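-- pv_equiv track=rewrite | github.com/Ruchey/k3 | k3r/utils.py | get_tree_parents
-- ===== SOURCE A (Python) =====
-- def get_tree_parents(unitpos, table):
--     """Возвращает список связанных родителей"""
--     tree = []
--     el = [i for i in table if i[0] == unitpos]
--     if el:
--         tree.extend(el)
--         tree.extend(get_tree_parents(el[0][1], table))
--         return tree
--     else:
--         return tree
-- ===== SOURCE B (Python) =====
-- def get_tree_parents(unitpos, table):
--     """Возвращает список связанных родителей"""
--     index = {}
--     for row in table:
--         index.setdefault(row[0], []).append(row)
--     tree = []
--     seen = set()
--     key = unitpos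
--     while key not in seen:
--         rows = index.get(key, [])
--         if not rows:
--             break
--         seen.add(key)
--         tree.extend(rows)
--         key = rows[0][1]
--     return tree
-- ===== Notes on version B (the rewrite author's own statement) =====
-- stated objective: alternative
-- what changed: B pre-groups the table into a dict keyed by first element in one pass and then follows the parent chain iteratively with a visited set (so a cyclic chain stops instead of recursing forever), instead of A's recursion that re-filters the whole table at every chain step.
import Mathlib
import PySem

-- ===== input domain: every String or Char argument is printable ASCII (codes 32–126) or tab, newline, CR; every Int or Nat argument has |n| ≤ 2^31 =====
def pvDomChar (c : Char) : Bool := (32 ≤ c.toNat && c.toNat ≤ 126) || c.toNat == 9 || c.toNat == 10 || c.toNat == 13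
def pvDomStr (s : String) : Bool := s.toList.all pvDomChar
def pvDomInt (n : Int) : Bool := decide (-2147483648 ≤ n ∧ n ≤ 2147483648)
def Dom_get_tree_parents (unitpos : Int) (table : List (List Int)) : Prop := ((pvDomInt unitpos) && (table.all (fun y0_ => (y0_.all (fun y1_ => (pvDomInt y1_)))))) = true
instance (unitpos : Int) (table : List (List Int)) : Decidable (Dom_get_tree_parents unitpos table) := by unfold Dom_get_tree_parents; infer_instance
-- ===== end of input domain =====

-- B replaces A's per-step re-filtering recursion by a one-pass dict grouping followed by an
-- iterative chain walk with a visited set (objective: alternative; return value only, no mutation).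

-- ===== PORT A =====
-- A recurses on the parent key; the fuel (table.length + 1) is a totality guard only: inside
-- Pre_ the chain visits pairwise-distinct keys, so the fuel is never exhausted (proved below).
def get_tree_parents_go (table : List (List Int)) : Nat → Int → List (List Int)
  | 0, _ => []
  | fuel + 1, u =>
    let el := table.filter (fun i => PySem.List.pyGet? i 0 == some u)
    if el.isEmpty then []
    else el ++ get_tree_parents_go table fuel
      ((PySem.List.pyGet? ((PySem.List.pyGet? el 0).getD []) 1).getD 0)

def get_tree_parents (unitpos : Int) (table : List (List Int)) : List (List Int) :=
  get_tree_parents_go table (table.length + 1) unitpos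

-- ===== PORT B =====
-- index.setdefault(row[0], []).append(row)  ==  d[k] = d.get(k, []) + [row]  ==  Dict.modify
def get_tree_parents_index (table : List (List Int)) : PySem.Dict Int (List (List Int)) :=
  table.foldl
    (fun d row => d.modify ((PySem.List.pyGet? row 0).getD 0) [] (fun g => g ++ [row]))
    PySem.Dict.empty

-- the while loop; fuel (table.length + 1) is a totality guard only: the visited set grows by one
-- key of the index at every iteration, so the loop body runs at most table.length times.
def get_tree_parents_loop (index : PySem.Dict Int (List (List Int))) :
    Nat → PySem.Set Int → List (List Int) → Int → List (List Int)
  | 0, _, tree, _ => tree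
  | fuel + 1, seen, tree, key =>
    if PySem.Set.contains seen key then tree
    else
      let rows := index.getD key []
      if rows.isEmpty then tree
      else get_tree_parents_loop index fuel (PySem.Set.add seen key) (tree ++ rows)
        ((PySem.List.pyGet? ((PySem.List.pyGet? rows 0).getD []) 1).getD 0)

def get_tree_parents_alt (unitpos : Int) (table : List (List Int)) : List (List Int) :=
  get_tree_parents_loop (get_tree_parents_index table) (table.length + 1)
    PySem.Set.empty [] unitpos

-- ===== PRECONDITION & SPEC =====
-- the first row of table whose first element is u (Python's `[i for i in table if i[0] == u][0]`)
def pvFirst (table : List (List Int)) (u : Int) : Option (List Int) :=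
  table.find? (fun i => PySem.List.pyGet? i 0 == some u)

-- "the parent chain starting at u is finite, and every visited first-match row has a second
-- element": the well-formedness predicate of A's recursion, stated as an inductive (accessibility
-- style) predicate on the input graph, not as a computation.
inductive pvChainOK (table : List (List Int)) : Int → Prop
  | stop (u : Int) : pvFirst table u = none → pvChainOK table u
  | step (u : Int) (r : List Int) (v : Int) :
      pvFirst table u = some r → PySem.List.pyGet? r 1 = some v →
      pvChainOK table v → pvChainOK table u

-- ---- decision procedure for pvChainOK (needed by the Decidable instances below) ----
-- the exact key sequence of the chain (last element = first unmatched key)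
inductive pvIsChain (table : List (List Int)) : Int → List Int → Prop
  | stop (u : Int) : pvFirst table u = none → pvIsChain table u [u]
  | step (u : Int) (r : List Int) (v : Int) (l : List Int) :
      pvFirst table u = some r → PySem.List.pyGet? r 1 = some v →
      pvIsChain table v l → pvIsChain table u (u :: l)

def pvChainChk (table : List (List Int)) : Nat → Int → Bool
  | 0, _ => false
  | n + 1, u =>
    match pvFirst table u with
    | none => true
    | some r =>
      match PySem.List.pyGet? r 1 with
      | none => false
      | some v => pvChainChk table n v

theorem pvIsChain_ne_nil {table : List (List Int)} {u : Int} {l : List Int}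
    (h : pvIsChain table u l) : l ≠ [] := by
  cases h <;> simp

theorem pvIsChain_unique {table : List (List Int)} {u : Int} {l₁ l₂ : List Int}
    (h₁ : pvIsChain table u l₁) (h₂ : pvIsChain table u l₂) : l₁ = l₂ := by
  induction h₁ generalizing l₂ with
  | stop u hn => cases h₂ with
    | stop => rfl
    | step u r v l hf => rw [hn] at hf; cases hf
  | step u r v l hf hg _ ih =>
    cases h₂ with
    | stop u hn => rw [hn] at hf; cases hf
    | step u r' v' l' hf' hg' hc' =>
      rw [hf] at hf'; cases hf'
      rw [hg] at hg'; cases hg'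
      rw [ih hc']

theorem pvIsChain_suffix {table : List (List Int)} {u : Int} {l : List Int}
    (h : pvIsChain table u l) :
    ∀ k ∈ l, ∃ l', pvIsChain table k l' ∧ l'.length ≤ l.length := by
  induction h with
  | stop u hn =>
    intro k hk
    simp at hk
    exact ⟨[u], by rw [hk]; exact .stop u hn, by simp⟩
  | step u r v l hf hg hc ih =>
    intro k hk
    rcases List.mem_cons.mp hk with rfl | hk
    · exact ⟨k :: l, .step k r v l hf hg hc, le_refl _⟩
    · obtain ⟨l', h1, h2⟩ := ih k hk
      exact ⟨l', h1, h2.trans (by simp)⟩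

theorem pvIsChain_nodup {table : List (List Int)} {u : Int} {l : List Int}
    (h : pvIsChain table u l) : l.Nodup := by
  induction h with
  | stop u hn => simp
  | step u r v l hf hg hc ih =>
    refine List.nodup_cons.mpr ⟨?_, ih⟩
    intro hu
    obtain ⟨l', h1, h2⟩ := pvIsChain_suffix hc u hu
    have := pvIsChain_unique (pvIsChain.step u r v l hf hg hc) h1
    rw [← this] at h2
    simp at h2

theorem pvIsChain_mem_heads {table : List (List Int)} {u : Int} {l : List Int}
    (h : pvIsChain table u l) :
    ∀ k ∈ l.dropLast, k ∈ table.filterMap (fun r => PySem.List.pyGet? r 0) := by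
  induction h with
  | stop u hn => simp
  | step u r v l hf hg hc ih =>
    intro k hk
    rw [List.dropLast_cons_of_ne_nil (pvIsChain_ne_nil hc)] at hk
    rcases List.mem_cons.mp hk with rfl | hk
    · have hr := List.find?_some hf
      have hmem := List.mem_of_find?_eq_some hf
      simp only [beq_iff_eq] at hr
      exact List.mem_filterMap.mpr ⟨r, hmem, hr⟩
    · exact ih k hk

theorem pvIsChain_length {table : List (List Int)} {u : Int} {l : List Int}
    (h : pvIsChain table u l) : l.length ≤ table.length + 1 := by
  have hnd : l.dropLast.Nodup := (pvIsChain_nodup h).sublist (List.dropLast_sublist l)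
  have hsub : l.dropLast ⊆ table.filterMap (fun r => PySem.List.pyGet? r 0) :=
    fun k hk => pvIsChain_mem_heads h k hk
  have hcard : l.dropLast.length ≤ (table.filterMap (fun r => PySem.List.pyGet? r 0)).length := by
    classical
    calc l.dropLast.length = l.dropLast.toFinset.card := (List.toFinset_card_of_nodup hnd).symm
      _ ≤ (table.filterMap (fun r => PySem.List.pyGet? r 0)).toFinset.card := by
          apply Finset.card_le_card
          intro x hx
          rw [List.mem_toFinset] at hx ⊢
          exact hsub hx
      _ ≤ (table.filterMap (fun r => PySem.List.pyGet? r 0)).length := by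
          rw [List.card_toFinset]
          exact (List.dedup_sublist _).length_le
  have hfm : (table.filterMap (fun r => PySem.List.pyGet? r 0)).length ≤ table.length :=
    List.length_filterMap_le _ _
  have hne := pvIsChain_ne_nil h
  have : l.length = l.dropLast.length + 1 := by
    rw [List.length_dropLast]
    have := List.length_pos_iff.mpr hne
    omega
  omega

theorem pvChainChk_sound {table : List (List Int)} :
    ∀ (n : Nat) (u : Int), pvChainChk table n u = true → pvChainOK table u := by
  intro n
  induction n with
  | zero => intro u h; simp [pvChainChk] at h
  | succ f ih =>
    intro u h
    unfold pvChainChk at h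
    cases hf : pvFirst table u with
    | none => exact .stop u hf
    | some r =>
      simp only [hf] at h
      cases hg : PySem.List.pyGet? r 1 with
      | none => exact (Bool.false_ne_true (by simpa only [hg] using h)).elim
      | some v =>
        simp only [hg] at h
        exact .step u r v hf hg (ih v h)

theorem pvChainChk_of_isChain {table : List (List Int)} {u : Int} {l : List Int}
    (h : pvIsChain table u l) :
    ∀ n, l.length ≤ n → pvChainChk table n u = true := by
  induction h with
  | stop u hn =>
    intro n hf
    match n, hf with
    | f + 1, _ => unfold pvChainChk; simp only [hn]
  | step u r v l hf hg hc ih =>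
    intro n hfl
    have : 0 < n := by simp at hfl; omega
    match n, hfl with
    | f + 1, hfl =>
      unfold pvChainChk
      simp only [hf, hg]
      exact ih f (by simpa using hfl)

theorem pvChainOK_exists_chain {table : List (List Int)} {u : Int}
    (h : pvChainOK table u) : ∃ l, pvIsChain table u l := by
  induction h with
  | stop u hn => exact ⟨[u], .stop u hn⟩
  | step u r v hf hg hc ih => obtain ⟨l, hl⟩ := ih; exact ⟨u :: l, .step u r v l hf hg hl⟩

theorem pvChainOK_iff_chk {table : List (List Int)} {u : Int} :
    pvChainOK table u ↔ pvChainChk table (table.length + 1) u = true := by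
  constructor
  · intro h
    obtain ⟨l, hl⟩ := pvChainOK_exists_chain h
    exact pvChainChk_of_isChain hl _ (pvIsChain_length hl)
  · exact pvChainChk_sound _ u

-- Pre_ is exactly A's normal-return domain: every row is nonempty (the comprehension indexes
-- i[0] on every row at every level), and the parent chain from unitpos is finite with every
-- visited first-match row long enough for el[0][1]; outside it Python A raises
-- (IndexError or RecursionError).
def Pre_get_tree_parents (unitpos : Int) (table : List (List Int)) : Prop :=
  (∀ r ∈ table, r ≠ []) ∧ pvChainOK table unitpos

instance (unitpos : Int) (table : List (List Int)) :
    Decidable (Pre_get_tree_parents unitpos table) :=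
  decidable_of_iff
    ((∀ r ∈ table, r ≠ []) ∧ pvChainChk table (table.length + 1) unitpos = true)
    (by unfold Pre_get_tree_parents; rw [pvChainOK_iff_chk])

def pvWitness_get_tree_parents : Int × List (List Int) := (5, [[5, 7], [7, 0]])

def Spec_get_tree_parents (unitpos : Int) (table : List (List Int)) (out : List (List Int)) : Prop :=
  out = get_tree_parents_alt unitpos table
instance (unitpos : Int) (table : List (List Int)) (out : List (List Int)) :
    Decidable (Spec_get_tree_parents unitpos table out) := by
  unfold Spec_get_tree_parents; infer_instance

-- ===== CLAIM (what is proved, stated in full; the proofs are below) =====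
def Claim_equal_get_tree_parents : Prop := ∀ (unitpos : Int) (table : List (List Int)), Dom_get_tree_parents unitpos table → Pre_get_tree_parents unitpos table → Spec_get_tree_parents unitpos table (get_tree_parents unitpos table)

-- ===== LEMMAS AND PROOFS =====

theorem pvFirst_eq_head_filter (table : List (List Int)) (u : Int) :
    pvFirst table u = (table.filter (fun i => PySem.List.pyGet? i 0 == some u)).head? := by
  induction table with
  | nil => rfl
  | cons r t ih =>
    unfold pvFirst at ih ⊢
    cases h : (PySem.List.pyGet? r 0 == some u) with
    | true =>
      rw [List.find?_cons_of_pos (p := fun i => PySem.List.pyGet? i 0 == some u) h,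
        List.filter_cons_of_pos (p := fun i => PySem.List.pyGet? i 0 == some u) h]
      rfl
    | false =>
      rw [List.find?_cons_of_neg (p := fun i => PySem.List.pyGet? i 0 == some u) (by simp [h]),
        List.filter_cons_of_neg (p := fun i => PySem.List.pyGet? i 0 == some u) (by simp [h])]
      exact ih

-- A's recursion computes the concatenation of the groups of the chain keys
theorem goA_eq {table : List (List Int)} {u : Int} {l : List Int}
    (h : pvIsChain table u l) :
    ∀ fuel, l.length ≤ fuel →
      get_tree_parents_go table fuel u =
        l.flatMap (fun k => table.filter (fun i => PySem.List.pyGet? i 0 == some k)) := by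
  induction h with
  | stop u hn =>
    intro fuel hf
    match fuel, hf with
    | f + 1, _ =>
      have hfil : table.filter (fun i => PySem.List.pyGet? i 0 == some u) = [] := by
        rw [← List.head?_eq_none_iff, ← pvFirst_eq_head_filter]; exact hn
      unfold get_tree_parents_go
      simp only [hfil, List.isEmpty_nil, if_true, List.flatMap_cons, List.flatMap_nil,
        List.append_nil]
  | step u r v l hf hg hc ih =>
    intro fuel hfl
    match fuel, hfl with
    | f + 1, hfl =>
      have hhead : (table.filter (fun i => PySem.List.pyGet? i 0 == some u)).head? = some r := by
        rw [← pvFirst_eq_head_filter]; exact hf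
      obtain ⟨rest, hel⟩ : ∃ rest,
          table.filter (fun i => PySem.List.pyGet? i 0 == some u) = r :: rest := by
        cases hfil : table.filter (fun i => PySem.List.pyGet? i 0 == some u) with
        | nil => rw [hfil] at hhead; cases hhead
        | cons a t => rw [hfil] at hhead; simp at hhead; exact ⟨t, by rw [hhead]⟩
      unfold get_tree_parents_go
      simp only [hel, List.isEmpty_cons, if_neg Bool.false_ne_true,
        PySem.List.pyGet?_zero_cons, Option.getD_some, hg]
      rw [ih f (by simpa using hfl)]
      simp [List.flatMap_cons, hel]

-- the grouping fold: looking up k in the index gives exactly A's filter (rows nonempty)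
theorem getD_index {table : List (List Int)} (hne : ∀ r ∈ table, r ≠ []) (k : Int) :
    (get_tree_parents_index table).getD k [] =
      table.filter (fun i => PySem.List.pyGet? i 0 == some k) := by
  unfold get_tree_parents_index
  have hmap : table.foldl
      (fun d row => d.modify ((PySem.List.pyGet? row 0).getD 0) [] (fun g => g ++ [row]))
      PySem.Dict.empty =
      (table.map (fun row => (((PySem.List.pyGet? row 0).getD 0 : Int), row))).foldl
        (fun d p => d.modify p.1 [] (fun g => g ++ [p.2])) PySem.Dict.empty := by
    rw [List.foldl_map]
  rw [hmap, PySem.Dict.getD_foldl_modify_append, PySem.Dict.getD_empty]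
  simp only [List.nil_append]
  induction table with
  | nil => simp
  | cons r t ih =>
    have hr : r ≠ [] := hne r (by simp)
    have ht : ∀ x ∈ t, x ≠ [] := fun x hx => hne x (List.mem_cons_of_mem _ hx)
    obtain ⟨a, rs, rfl⟩ : ∃ a rs, r = a :: rs := by
      cases r with
      | nil => exact absurd rfl hr
      | cons a rs => exact ⟨a, rs, rfl⟩
    have ih' := ih ht (by rw [List.foldl_map])
    simp only [List.map_cons, List.filter_cons, PySem.List.pyGet?_zero_cons, Option.getD_some]
    cases h : (a == k) with
    | true =>
      have h2 : (some a == some k) = true := by simpa using h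
      simp only [h2, if_true, List.map_cons, ih']
    | false =>
      have h2 : (some a == some k) = false := by simpa using h
      simp only [h2, Bool.false_eq_true, if_false, ih']

-- B's loop walks the same chain and appends the same groups
theorem loop_eq {table : List (List Int)} (hne : ∀ r ∈ table, r ≠ []) {u : Int} {l : List Int}
    (h : pvIsChain table u l) :
    ∀ fuel, l.length ≤ fuel → ∀ (seen : PySem.Set Int) (tree : List (List Int)),
      (∀ k ∈ l, PySem.Set.contains seen k = false) →
      get_tree_parents_loop (get_tree_parents_index table) fuel seen tree u =
        tree ++ l.flatMap (fun k => table.filter (fun i => PySem.List.pyGet? i 0 == some k)) := by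
  induction h with
  | stop u hn =>
    intro fuel hf seen tree hseen
    match fuel, hf with
    | f + 1, _ =>
      have hfil : table.filter (fun i => PySem.List.pyGet? i 0 == some u) = [] := by
        rw [← List.head?_eq_none_iff, ← pvFirst_eq_head_filter]; exact hn
      have hs : PySem.Set.contains seen u = false := hseen u (by simp)
      unfold get_tree_parents_loop
      simp [getD_index hne, hfil]
  | step u r v l hf hg hc ih =>
    intro fuel hfl seen tree hseen
    match fuel, hfl with
    | f + 1, hfl =>
      have hhead : (table.filter (fun i => PySem.List.pyGet? i 0 == some u)).head? = some r := by
        rw [← pvFirst_eq_head_filter]; exact hf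
      obtain ⟨rest, hel⟩ : ∃ rest,
          table.filter (fun i => PySem.List.pyGet? i 0 == some u) = r :: rest := by
        cases hfil : table.filter (fun i => PySem.List.pyGet? i 0 == some u) with
        | nil => rw [hfil] at hhead; cases hhead
        | cons a t => rw [hfil] at hhead; simp at hhead; exact ⟨t, by rw [hhead]⟩
      have hs : PySem.Set.contains seen u = false := hseen u (by simp)
      have hul : u ∉ l := by
        have hnd := pvIsChain_nodup (pvIsChain.step u r v l hf hg hc)
        exact (List.nodup_cons.mp hnd).1
      unfold get_tree_parents_loop
      simp only [hs, Bool.false_eq_true, getD_index hne, hel, List.isEmpty_cons,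
        PySem.List.pyGet?_zero_cons, Option.getD_some, hg, ite_false]
      rw [ih f (by simpa using hfl) (PySem.Set.add seen u) (tree ++ (r :: rest))]
      · simp [List.flatMap_cons, hel]
      · intro k hk
        have hk' : k ∈ seen ∨ k = u ↔ k ∈ PySem.Set.add seen u := (PySem.Set.mem_add seen u k).symm
        rw [← Bool.not_eq_true]
        rw [PySem.Set.contains_iff]
        intro hmem
        rcases hk'.mpr hmem with hks | rfl
        · have := hseen k (List.mem_cons_of_mem _ hk)
          rw [← Bool.not_eq_true, PySem.Set.contains_iff] at this
          exact this hks
        · exact hul hk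

-- ===== VERDICT (by name: the statement is the Claim_ definition above) =====
theorem get_tree_parents_spec : Claim_equal_get_tree_parents := by
  intro u table _ hpre
  obtain ⟨hne, hchain⟩ := hpre
  obtain ⟨l, hl⟩ := pvChainOK_exists_chain hchain
  have hlen := pvIsChain_length hl
  unfold Spec_get_tree_parents get_tree_parents get_tree_parents_alt
  rw [goA_eq hl _ hlen, loop_eq hne hl _ hlen PySem.Set.empty []]
  · simp
  · intro k _
    rfl
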